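-- pv_equiv track=rewrite | github.com/MaciejAmbroziak/battleship | Battleship_ver3.py | ship_position_check_on_map
-- ===== SOURCE A (Python) =====
-- def ship_position_check_on_map(cords):
--     temp = []
--     for i in range(len(cords)):
--         if cords[i] <= 10 and cords[i] >= 1:
--             temp.append(1)
--         else:
--             temp.append(0)
--     if sum(temp) == len(temp):
--         return True
--     else:
--         return False
-- ===== SOURCE B (Python) =====
-- def ship_position_check_on_map(cords):
--     return not cords or (min(cords) >= 1 and max(cords) <= 10)
-- ===== Notes on version B (the rewrite author's own statement) =====
-- stated objective: faster
-- what changed: B drops A's per-element 0/1 tally list and sum==len test, instead checking aggregate min/max bounds via builtin reductions with the empty list vacuously True; no intermediate list is built.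
import Mathlib
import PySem

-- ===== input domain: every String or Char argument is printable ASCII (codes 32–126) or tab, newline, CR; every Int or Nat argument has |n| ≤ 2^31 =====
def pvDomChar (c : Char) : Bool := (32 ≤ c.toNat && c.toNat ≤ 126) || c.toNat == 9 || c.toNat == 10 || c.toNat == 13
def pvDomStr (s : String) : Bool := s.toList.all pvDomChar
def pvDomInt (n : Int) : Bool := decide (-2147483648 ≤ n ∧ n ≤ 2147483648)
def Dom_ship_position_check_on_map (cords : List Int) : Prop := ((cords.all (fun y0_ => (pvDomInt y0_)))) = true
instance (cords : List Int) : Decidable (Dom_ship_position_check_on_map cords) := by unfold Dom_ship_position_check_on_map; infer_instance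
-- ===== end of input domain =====

-- B replaces A's per-element 0/1 tally list and sum==len test with aggregate min/max bound
-- checks (empty list vacuously True); measurably faster by a constant factor.

-- ===== PORT A =====
-- Port of A: build temp (1/0 per index over range(len)), then test sum == len.
def ship_position_check_on_map (cords : List Int) : Bool :=
  let temp : List Int := (List.range cords.length).foldl
    (fun t i => if cords.getD i 0 ≤ 10 ∧ 1 ≤ cords.getD i 0 then t ++ [(1 : Int)] else t ++ [(0 : Int)]) []
  decide (temp.sum = (temp.length : Int))

-- ===== PORT B =====
-- Port of B: empty is vacuously true, otherwise min ≥ 1 and max ≤ 10 (min/max as Python's fold).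
def ship_position_check_on_map_alt (cords : List Int) : Bool :=
  match cords with
  | [] => true
  | c :: cs => decide (1 ≤ cs.foldl min c) && decide (cs.foldl max c ≤ 10)

-- ===== PRECONDITION & SPEC =====
def Spec_ship_position_check_on_map (cords : List Int) (out : Bool) : Prop := out = ship_position_check_on_map_alt cords
instance (cords : List Int) (out : Bool) : Decidable (Spec_ship_position_check_on_map cords out) := by unfold Spec_ship_position_check_on_map; infer_instance

-- ===== CLAIM (what is proved, stated in full; the proofs are below) =====
def Claim_equal_ship_position_check_on_map : Prop := ∀ (cords : List Int), Dom_ship_position_check_on_map cords → Spec_ship_position_check_on_map cords (ship_position_check_on_map cords)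

-- ===== LEMMAS AND PROOFS =====

-- ===== VERDICT (by name: the statement is the Claim_ definition above) =====

def pvF (c : Int) : Int := if c ≤ 10 ∧ 1 ≤ c then 1 else 0

theorem pv_foldl_app {α : Type} (g : α → List Int) :
    ∀ (l : List α) (acc : List Int),
      l.foldl (fun t i => t ++ g i) acc = acc ++ l.flatMap g := by
  intro l
  induction l with
  | nil => intro acc; simp
  | cons x xs ih => intro acc; simp [List.foldl, ih, List.flatMap_cons, List.append_assoc]

theorem pv_map_range_getD :
    ∀ (l : List Int), (List.range l.length).map (fun i => l.getD i 0) = l := by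
  intro l
  induction l with
  | nil => simp
  | cons x xs ih =>
    simp only [List.length_cons, List.range_succ_eq_map, List.map_cons, List.map_map]
    simpa using ih

theorem pv_temp_eq (cords : List Int) :
    (List.range cords.length).foldl
      (fun t i => if cords.getD i 0 ≤ 10 ∧ 1 ≤ cords.getD i 0 then t ++ [(1 : Int)] else t ++ [(0 : Int)]) []
    = cords.map pvF := by
  have h := pv_foldl_app (fun i => [pvF (cords.getD i 0)]) (List.range cords.length) []
  have h2 : (fun (t : List Int) i => t ++ [pvF (cords.getD i 0)])
      = fun (t : List Int) i => if cords.getD i 0 ≤ 10 ∧ 1 ≤ cords.getD i 0 then t ++ [(1 : Int)] else t ++ [(0 : Int)] := by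
    funext t i; simp [pvF]; split_ifs <;> rfl
  rw [← h2, h]
  simp only [List.nil_append]
  conv_rhs => rw [← pv_map_range_getD cords, List.map_map]
  induction List.range cords.length with
  | nil => rfl
  | cons a l ihl => rw [List.flatMap_cons, List.map_cons, ihl]; rfl

theorem pv_sum_bound (l : List Int) :
    0 ≤ (l.map pvF).sum ∧ (l.map pvF).sum ≤ ((l.map pvF).length : Int) := by
  induction l with
  | nil => simp
  | cons x xs ih =>
    simp only [List.map_cons, List.sum_cons, List.length_cons]
    have : pvF x = 0 ∨ pvF x = 1 := by unfold pvF; split_ifs <;> simp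
    rcases this with h | h <;> rw [h] <;> push_cast <;> omega

theorem pv_sum_iff (l : List Int) :
    (l.map pvF).sum = ((l.map pvF).length : Int) ↔ ∀ c ∈ l, 1 ≤ c ∧ c ≤ 10 := by
  induction l with
  | nil => simp
  | cons x xs ih =>
    simp only [List.map_cons, List.sum_cons, List.length_cons, List.mem_cons]
    obtain ⟨h0, h1⟩ := pv_sum_bound xs
    constructor
    · intro h
      have hx : pvF x = 1 := by
        have : pvF x = 0 ∨ pvF x = 1 := by unfold pvF; split_ifs <;> simp
        rcases this with hh | hh
        · exfalso; rw [hh] at h; push_cast at h; omega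
        · exact hh
      have hx' : 1 ≤ x ∧ x ≤ 10 := by
        by_contra hc
        have h00 : pvF x = 0 := by unfold pvF; rw [if_neg (fun hi => hc ⟨hi.2, hi.1⟩)]
        omega
      have hs : (xs.map pvF).sum = ((xs.map pvF).length : Int) := by
        rw [hx] at h; push_cast at h ⊢; omega
      exact fun c hc => hc.elim (fun e => e ▸ hx') (ih.mp hs c)
    · intro h
      have hx : pvF x = 1 := by
        unfold pvF
        have := h x (Or.inl rfl)
        split_ifs with hi
        · rfl
        · exact absurd ⟨this.2, this.1⟩ hi
      have hs := ih.mpr (fun c hc => h c (Or.inr hc))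
      rw [hx, hs]; push_cast; ring

theorem pv_foldl_min (a : Int) : ∀ (cs : List Int) (c : Int),
    a ≤ cs.foldl min c ↔ a ≤ c ∧ ∀ x ∈ cs, a ≤ x := by
  intro cs
  induction cs with
  | nil => intro c; simp
  | cons y ys ih =>
    intro c
    simp only [List.foldl_cons, List.mem_cons, ih, le_min_iff]
    constructor
    · rintro ⟨⟨h1, h2⟩, h3⟩; exact ⟨h1, fun x hx => hx.elim (fun e => e ▸ h2) (h3 x)⟩
    · rintro ⟨h1, h2⟩; exact ⟨⟨h1, h2 y (Or.inl rfl)⟩, fun x hx => h2 x (Or.inr hx)⟩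

theorem pv_foldl_max (a : Int) : ∀ (cs : List Int) (c : Int),
    cs.foldl max c ≤ a ↔ c ≤ a ∧ ∀ x ∈ cs, x ≤ a := by
  intro cs
  induction cs with
  | nil => intro c; simp
  | cons y ys ih =>
    intro c
    simp only [List.foldl_cons, List.mem_cons, ih, max_le_iff]
    constructor
    · rintro ⟨⟨h1, h2⟩, h3⟩; exact ⟨h1, fun x hx => hx.elim (fun e => e ▸ h2) (h3 x)⟩
    · rintro ⟨h1, h2⟩; exact ⟨⟨h1, h2 y (Or.inl rfl)⟩, fun x hx => h2 x (Or.inr hx)⟩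

theorem pv_alt_iff (cords : List Int) :
    ship_position_check_on_map_alt cords = true ↔ ∀ c ∈ cords, 1 ≤ c ∧ c ≤ 10 := by
  cases cords with
  | nil => simp [ship_position_check_on_map_alt]
  | cons c cs =>
    simp only [ship_position_check_on_map_alt, Bool.and_eq_true, decide_eq_true_eq,
      pv_foldl_min, pv_foldl_max, List.mem_cons]
    constructor
    · rintro ⟨⟨h1, h2⟩, h3, h4⟩
      exact fun x hx => hx.elim (fun e => e ▸ ⟨h1, h3⟩) (fun hm => ⟨h2 x hm, h4 x hm⟩)
    · intro h
      exact ⟨⟨(h c (Or.inl rfl)).1, fun x hx => (h x (Or.inr hx)).1⟩,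
             (h c (Or.inl rfl)).2, fun x hx => (h x (Or.inr hx)).2⟩

theorem pv_a_iff (cords : List Int) :
    ship_position_check_on_map cords = true ↔ ∀ c ∈ cords, 1 ≤ c ∧ c ≤ 10 := by
  unfold ship_position_check_on_map
  simp only [pv_temp_eq, decide_eq_true_eq]
  exact pv_sum_iff cords

theorem ship_position_check_on_map_spec : Claim_equal_ship_position_check_on_map := by
  intro cords _
  unfold Spec_ship_position_check_on_map
  cases hA : ship_position_check_on_map cords <;>
  cases hB : ship_position_check_on_map_alt cords <;> try rfl
  · exact absurd ((pv_a_iff cords).mpr ((pv_alt_iff cords).mp hB)) (by simp [hA])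
  · exact absurd ((pv_alt_iff cords).mpr ((pv_a_iff cords).mp hA)) (by simp [hB])
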